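-- pv_equiv track=rewrite | github.com/Balut-moko/procon-grassmaker-archive | atcoder/agc043/agc043_a/32251282.py | bfs
-- ===== SOURCE A (Python) =====
-- from collections import deque
--
-- def bfs(grid):
--     h = len(grid)
--     w = len(grid[0])
--     dist = [[1 << 60] * w for _ in range(h)]
--     dist[0][0] = 0
--     if grid[0][0] == "#":
--         dist[0][0] = 1
--     dd = ((1, 0), (0, 1))
--     que = deque([(0, 0)])
--     while que:
--         r, c = que.popleft()
--         cur = dist[r][c]
--         for dr, dc in dd:
--             nr = r + dr
--             nc = c + dc
--             if not (0 <= nr < h and 0 <= nc < w):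
--                 continue
--             if grid[r][c] == "." and grid[nr][nc] == "#":
--                 if cur + 1 < dist[nr][nc]:
--                     dist[nr][nc] = cur + 1
--                     que.append((nr, nc))
--             else:
--                 if cur < dist[nr][nc]:
--                     dist[nr][nc] = cur
--                     que.append((nr, nc))
--     return dist
-- ===== SOURCE B (Python) =====
-- def bfs(grid):
--     h = len(grid)
--     w = len(grid[0])
--     def cost(a, b):
--         return 1 if a == "." and b == "#" else 0
--     dist = []
--     prev = None
--     for r in range(h):
--         row = []
--         for c in range(w):
--             if r == 0 and c == 0:
--                 d = 1 if grid[0][0] == "#" else 0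
--             else:
--                 cands = []
--                 if r > 0:
--                     cands.append(prev[c] + cost(grid[r - 1][c], grid[r][c]))
--                 if c > 0:
--                     cands.append(row[c - 1] + cost(grid[r][c - 1], grid[r][c]))
--                 d = min(cands)
--             row.append(d)
--         dist.append(row)
--         prev = row
--     return dist
-- ===== Notes on version B (the rewrite author's own statement) =====
-- stated objective: alternative
-- what changed: Replaced the deque-based label-correcting relaxation (cells re-enqueued and re-expanded whenever a distance improves) by a single row-major dynamic-programming pass over the down/right DAG: each cell's value is computed once as the min over its up/left predecessors.
-- outside the precondition, e.g. on bfs(['ab', '#']): A returns [[0, 0], [0, 0]], B raises IndexError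
import Mathlib
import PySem

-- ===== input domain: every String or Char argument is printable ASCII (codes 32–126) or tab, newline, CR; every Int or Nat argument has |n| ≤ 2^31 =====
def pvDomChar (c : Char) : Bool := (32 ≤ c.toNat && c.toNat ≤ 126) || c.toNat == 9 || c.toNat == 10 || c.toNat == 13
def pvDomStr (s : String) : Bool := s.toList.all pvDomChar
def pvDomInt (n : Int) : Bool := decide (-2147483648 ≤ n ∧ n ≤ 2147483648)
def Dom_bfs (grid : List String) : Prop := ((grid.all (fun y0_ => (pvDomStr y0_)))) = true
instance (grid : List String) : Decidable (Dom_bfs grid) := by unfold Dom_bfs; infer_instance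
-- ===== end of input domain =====

-- B replaces A's deque-based relaxation (cells re-enqueued while distances improve) by a
-- single row-major DP pass over the down/right DAG; same return value (alternative algorithm).

-- ===== PORT A =====
-- 2D read/write on the list-of-lists distance matrix (Python dist[r][c] / dist[r][c] = x)
def pvGet2 (d : List (List Int)) (r c : Nat) : Int := (d.getD r []).getD c 0
def pvSet2 (d : List (List Int)) (r c : Nat) (x : Int) : List (List Int) :=
  d.set r ((d.getD r []).set c x)
-- grid[r][c] as a character (only read in range on admitted inputs)
def pvCh (g : List (List Char)) (r c : Nat) : Char := (g.getD r []).getD c ' '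

-- one iteration of A's inner 'for dr, dc in dd' body
def pvRelax (g : List (List Char)) (hh ww : Nat) (r c : Nat) (cur : Int) (dr dc : Nat)
    (st : List (List Int) × List (Nat × Nat)) : List (List Int) × List (Nat × Nat) :=
  let nr := r + dr
  let nc := c + dc
  if nr < hh ∧ nc < ww then
    if pvCh g r c = '.' ∧ pvCh g nr nc = '#' then
      if cur + 1 < pvGet2 st.1 nr nc then (pvSet2 st.1 nr nc (cur + 1), st.2 ++ [(nr, nc)])
      else st
    else
      if cur < pvGet2 st.1 nr nc then (pvSet2 st.1 nr nc cur, st.2 ++ [(nr, nc)])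
      else st
  else st

-- fuel for the 'while que' loop (a proof artifact making the recursion total; proven sufficient below)
def pvFuel (hh ww : Nat) : Nat := 3 * (hh * ww * 2 ^ 60) + 2

-- A's 'while que' loop; que is a FIFO list (popleft = head, append = ++ [·])
def pvLoop (g : List (List Char)) (hh ww : Nat) :
    Nat → List (List Int) → List (Nat × Nat) → List (List Int)
  | _, dist, [] => dist
  | 0, dist, _ => dist
  | fuel + 1, dist, (r, c) :: rest =>
      let cur := pvGet2 dist r c
      let st := pvRelax g hh ww r c cur 0 1 (pvRelax g hh ww r c cur 1 0 (dist, rest))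
      pvLoop g hh ww fuel st.1 st.2

def bfs (grid : List String) : List (List Int) :=
  let g := grid.map String.toList
  let hh := grid.length
  let ww := (g.headD []).length
  let dist0 := List.replicate hh (List.replicate ww ((2 : Int) ^ 60))
  let dist1 := pvSet2 dist0 0 0 (if pvCh g 0 0 = '#' then 1 else 0)
  pvLoop g hh ww (pvFuel hh ww) dist1 [(0, 0)]

-- ===== PORT B =====
-- cost of the step (r1,c1) -> (r2,c2): 1 iff '.' -> '#'
def pvCost (g : List (List Char)) (r1 c1 r2 c2 : Nat) : Int :=
  if pvCh g r1 c1 = '.' ∧ pvCh g r2 c2 = '#' then 1 else 0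

-- one cell of B's DP: min over the up/left candidate list (Python's min of a nonempty list)
def pvCellB (g : List (List Char)) (prev row : List Int) (r c : Nat) : Int :=
  if r = 0 ∧ c = 0 then (if pvCh g 0 0 = '#' then 1 else 0)
  else
    let cands :=
      (if 0 < r then [prev.getD c 0 + pvCost g (r - 1) c r c] else []) ++
      (if 0 < c then [row.getD (c - 1) 0 + pvCost g r (c - 1) r c] else [])
    match cands with
    | [] => 0
    | x :: xs => xs.foldl min x

def bfs_alt (grid : List String) : List (List Int) :=
  let g := grid.map String.toList
  let hh := grid.length
  let ww := (g.headD []).length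
  ((List.range hh).foldl
    (fun (acc : List (List Int) × List Int) r =>
      let row := (List.range ww).foldl (fun row c => row ++ [pvCellB g acc.2 row r c]) []
      (acc.1 ++ [row], row))
    ([], [])).1

-- ===== PRECONDITION & SPEC =====
-- Pre_ excludes the empty grid and an empty first row (A raises IndexError there), and grids
-- where some row is shorter than the first row: on those A usually raises IndexError too, and
-- where its short-circuited 'and' happens to skip the out-of-range read A returns a value that
-- B's algorithm cannot reach because B raises IndexError (see the cite in claim.json).  The
-- last conjunct only discards grids that no real machine can hold (more than 2^60 cells along
-- the two sides together): on such grids A's 1 << 60 initial value would stop acting as an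
-- effective infinity; every materialisable grid satisfies it.
def Pre_bfs (grid : List String) : Prop :=
  grid ≠ [] ∧ 0 < (grid.headD "").length ∧
  (∀ s ∈ grid, (grid.headD "").length ≤ s.length) ∧
  grid.length + (grid.headD "").length ≤ 2 ^ 60
instance (grid : List String) : Decidable (Pre_bfs grid) := by unfold Pre_bfs; infer_instance

def pvWitness_bfs : List String := ["#.", ".#"]

def Spec_bfs (grid : List String) (out : List (List Int)) : Prop := out = bfs_alt grid
instance (grid : List String) (out : List (List Int)) : Decidable (Spec_bfs grid out) := by
  unfold Spec_bfs; infer_instance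

-- ===== CLAIM (what is proved, stated in full; the proofs are below) =====
def Claim_equal_bfs : Prop :=
  ∀ (grid : List String), Dom_bfs grid → Pre_bfs grid → Spec_bfs grid (bfs grid)

-- ===== LEMMAS AND PROOFS =====

-- the mathematical DP over the down/right DAG, by structural recursion on (r, c)
def dpF (g : List (List Char)) : Nat → Nat → Int
  | 0, 0 => if pvCh g 0 0 = '#' then 1 else 0
  | 0, c + 1 => dpF g 0 c + pvCost g 0 c 0 (c + 1)
  | r + 1, 0 => dpF g r 0 + pvCost g r 0 (r + 1) 0
  | r + 1, c + 1 =>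
      min (dpF g r (c + 1) + pvCost g r (c + 1) (r + 1) (c + 1))
          (dpF g (r + 1) c + pvCost g (r + 1) c (r + 1) (c + 1))

def dpMat (g : List (List Char)) (hh ww : Nat) : List (List Int) :=
  (List.range hh).map (fun r => (List.range ww).map (fun c => dpF g r c))

def Shape (hh ww : Nat) (d : List (List Int)) : Prop :=
  d.length = hh ∧ ∀ i < hh, (d.getD i []).length = ww

def sumD (d : List (List Int)) : Int := (d.map (fun row => row.sum)).sum

def muM (d : List (List Int)) (q : List (Nat × Nat)) : Nat :=
  3 * (sumD d).toNat + q.length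

-- the loop invariant of A's relaxation loop
def InvA (g : List (List Char)) (hh ww : Nat) (d : List (List Int)) (q : List (Nat × Nat)) : Prop :=
  Shape hh ww d ∧
  pvGet2 d 0 0 = dpF g 0 0 ∧
  (∀ r c, r < hh → c < ww → dpF g r c ≤ pvGet2 d r c) ∧
  (∀ r c, r < hh → c < ww → (r, c) ∈ q ∨
    ((r + 1 < hh → pvGet2 d (r + 1) c ≤ pvGet2 d r c + pvCost g r c (r + 1) c) ∧
     (c + 1 < ww → pvGet2 d r (c + 1) ≤ pvGet2 d r c + pvCost g r c r (c + 1)))) ∧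
  (∀ p ∈ q, p.1 < hh ∧ p.2 < ww)

-- uniform form of one relaxation attempt
def rStep (g : List (List Char)) (hh ww : Nat) (r c : Nat) (cur : Int) (nr nc : Nat)
    (st : List (List Int) × List (Nat × Nat)) : List (List Int) × List (Nat × Nat) :=
  if nr < hh ∧ nc < ww then
    if cur + pvCost g r c nr nc < pvGet2 st.1 nr nc then
      (pvSet2 st.1 nr nc (cur + pvCost g r c nr nc), st.2 ++ [(nr, nc)])
    else st
  else st

lemma relax_eq (g : List (List Char)) (hh ww r c : Nat) (cur : Int) (dr dc : Nat)
    (st : List (List Int) × List (Nat × Nat)) :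
    pvRelax g hh ww r c cur dr dc st = rStep g hh ww r c cur (r + dr) (c + dc) st := by
  unfold pvRelax rStep pvCost
  by_cases hg : pvCh g r c = '.' ∧ pvCh g (r + dr) (c + dc) = '#' <;> simp [hg]

lemma cost_nonneg (g : List (List Char)) (r1 c1 r2 c2 : Nat) : 0 ≤ pvCost g r1 c1 r2 c2 := by
  unfold pvCost; split <;> norm_num

lemma cost_le_one (g : List (List Char)) (r1 c1 r2 c2 : Nat) : pvCost g r1 c1 r2 c2 ≤ 1 := by
  unfold pvCost; split <;> norm_num

lemma dp_nonneg_aux (g : List (List Char)) :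
    ∀ n r c, r + c ≤ n → 0 ≤ dpF g r c := by
  intro n
  induction n with
  | zero =>
    intro r c h
    obtain ⟨rfl, rfl⟩ : r = 0 ∧ c = 0 := by omega
    simp [dpF]; split <;> norm_num
  | succ n ih =>
    intro r c h
    match r, c with
    | 0, 0 => simp [dpF]; split <;> norm_num
    | 0, c + 1 =>
      have := ih 0 c (by omega)
      have := cost_nonneg g 0 c 0 (c + 1)
      simp only [dpF]; omega
    | r + 1, 0 =>
      have := ih r 0 (by omega)
      have := cost_nonneg g r 0 (r + 1) 0
      simp only [dpF]; omega
    | r + 1, c + 1 =>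
      have h1 := ih r (c + 1) (by omega)
      have h2 := ih (r + 1) c (by omega)
      have c1 := cost_nonneg g r (c + 1) (r + 1) (c + 1)
      have c2 := cost_nonneg g (r + 1) c (r + 1) (c + 1)
      simp only [dpF, le_min_iff]
      omega

lemma dp_nonneg (g : List (List Char)) (r c : Nat) : 0 ≤ dpF g r c :=
  dp_nonneg_aux g (r + c) r c le_rfl

lemma dp_bound_aux (g : List (List Char)) :
    ∀ n r c, r + c ≤ n → dpF g r c ≤ (r : Int) + c + 1 := by
  intro n
  induction n with
  | zero =>
    intro r c h
    obtain ⟨rfl, rfl⟩ : r = 0 ∧ c = 0 := by omega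
    simp [dpF]; split <;> norm_num
  | succ n ih =>
    intro r c h
    match r, c with
    | 0, 0 => simp [dpF]; split <;> norm_num
    | 0, c + 1 =>
      have := ih 0 c (by omega)
      have := cost_le_one g 0 c 0 (c + 1)
      simp only [dpF]; push_cast; push_cast at this; omega
    | r + 1, 0 =>
      have := ih r 0 (by omega)
      have := cost_le_one g r 0 (r + 1) 0
      simp only [dpF]; push_cast; push_cast at this; omega
    | r + 1, c + 1 =>
      have h1 := ih r (c + 1) (by omega)
      have c1 := cost_le_one g r (c + 1) (r + 1) (c + 1)
      simp only [dpF, min_le_iff]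
      left
      push_cast; push_cast at h1; omega

lemma dp_bound (g : List (List Char)) (r c : Nat) : dpF g r c ≤ (r : Int) + c + 1 :=
  dp_bound_aux g (r + c) r c le_rfl

lemma dp_pred_down (g : List (List Char)) (r c : Nat) :
    dpF g (r + 1) c ≤ dpF g r c + pvCost g r c (r + 1) c := by
  cases c <;> simp [dpF]

lemma dp_pred_right (g : List (List Char)) (r c : Nat) :
    dpF g r (c + 1) ≤ dpF g r c + pvCost g r c r (c + 1) := by
  cases r <;> simp [dpF]

-- small getD/set lemmas
lemma getD_set_self {α : Type} (l : List α) (i : Nat) (v dflt : α) (h : i < l.length) :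
    (l.set i v).getD i dflt = v := by
  rw [List.getD_eq_getElem _ _ (by simpa using h)]
  simp

lemma getD_set_ne {α : Type} (l : List α) {i j : Nat} (v dflt : α) (h : j ≠ i) :
    (l.set i v).getD j dflt = l.getD j dflt := by
  by_cases hj : j < l.length
  · rw [List.getD_eq_getElem _ _ (by simpa using hj), List.getD_eq_getElem _ _ hj]
    simp [h.symm]
  · rw [List.getD_eq_default _ _ (by simpa using (not_lt.mp hj)),
      List.getD_eq_default _ _ (not_lt.mp hj)]

lemma get2_set2_self (d : List (List Int)) (r c : Nat) (v : Int)
    (hr : r < d.length) (hc : c < (d.getD r []).length) :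
    pvGet2 (pvSet2 d r c v) r c = v := by
  unfold pvGet2 pvSet2
  rw [getD_set_self _ _ _ _ hr, getD_set_self _ _ _ _ hc]

lemma get2_set2_ne (d : List (List Int)) (r c x y : Nat) (v : Int)
    (h : x ≠ r ∨ y ≠ c) :
    pvGet2 (pvSet2 d r c v) x y = pvGet2 d x y := by
  unfold pvGet2 pvSet2
  rcases h with h | h
  · rw [getD_set_ne _ _ _ h]
  · by_cases hx : x = r
    · subst hx
      by_cases hr : x < d.length
      · rw [getD_set_self _ _ _ _ hr, getD_set_ne _ _ _ h]
      · rw [List.getD_eq_default, List.getD_eq_default] <;> simp [not_lt.mp hr]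
    · rw [getD_set_ne _ _ _ hx]

lemma set_oob {α : Type} (l : List α) (i : Nat) (v : α) (h : l.length ≤ i) :
    l.set i v = l := by
  induction l generalizing i with
  | nil => simp
  | cons a t ih =>
    cases i with
    | zero => simp at h
    | succ j => simp [ih j (by simpa using h)]

lemma shape_set2 (hh ww : Nat) (d : List (List Int)) (r c : Nat) (v : Int)
    (hsh : Shape hh ww d) : Shape hh ww (pvSet2 d r c v) := by
  obtain ⟨h1, h2⟩ := hsh
  by_cases hr : r < d.length
  · refine ⟨by simpa [pvSet2] using h1, ?_⟩
    intro i hi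
    by_cases hir : i = r
    · subst hir
      unfold pvSet2; rw [getD_set_self _ _ _ _ hr]
      by_cases hc : c < (d.getD i []).length
      · rw [← h2 i hi]; simp
      · rw [set_oob _ _ _ (not_lt.mp hc)]; exact h2 i hi
    · unfold pvSet2; rw [getD_set_ne _ _ _ hir]; exact h2 i hi
  · unfold pvSet2; rw [set_oob _ _ _ (not_lt.mp hr)]; exact ⟨h1, h2⟩

lemma sum_set (l : List Int) (i : Nat) (v : Int) (h : i < l.length) :
    (l.set i v).sum = l.sum + v - l.getD i 0 := by
  induction l generalizing i with
  | nil => simp at h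
  | cons a t ih =>
    cases i with
    | zero => simp [List.sum_cons]; ring
    | succ j =>
      simp only [List.set_cons_succ, List.sum_cons, List.getD_cons_succ]
      rw [ih j (by simpa using h)]; ring

lemma sumD_set2 (d : List (List Int)) (r c : Nat) (v : Int)
    (hr : r < d.length) (hc : c < (d.getD r []).length) :
    sumD (pvSet2 d r c v) = sumD d + v - pvGet2 d r c := by
  unfold sumD pvSet2 pvGet2
  rw [List.map_set, sum_set _ _ _ (by simpa using hr)]
  rw [sum_set _ _ _ hc]
  have : (d.map (fun row => row.sum)).getD r 0 = (d.getD r []).sum := by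
    rw [List.getD_eq_getElem _ _ (by simpa using hr), List.getD_eq_getElem _ _ hr]
    simp
  rw [this]; ring

lemma sumD_nonneg (g : List (List Char)) (hh ww : Nat) (d : List (List Int))
    (hsh : Shape hh ww d)
    (hlow : ∀ r c, r < hh → c < ww → dpF g r c ≤ pvGet2 d r c) :
    0 ≤ sumD d := by
  unfold sumD
  apply List.sum_nonneg
  intro x hx
  rw [List.mem_map] at hx
  obtain ⟨row, hrow, rfl⟩ := hx
  apply List.sum_nonneg
  intro y hy
  rw [List.mem_iff_getElem] at hrow hy
  obtain ⟨i, hi, rfl⟩ := hrow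
  obtain ⟨j, hj, rfl⟩ := hy
  obtain ⟨hlen, hrows⟩ := hsh
  have hiD : d.getD i [] = d[i] := List.getD_eq_getElem d [] hi
  have hih : i < hh := by omega
  have hjw : j < ww := by have := hrows i hih; rw [hiD] at this; omega
  have := hlow i j hih hjw
  have hget : pvGet2 d i j = d[i][j] := by
    unfold pvGet2; rw [hiD, List.getD_eq_getElem _ _ hj]
  have := dp_nonneg g i j
  omega

-- single relaxation step specification
lemma rStep_spec (g : List (List Char)) (hh ww r c : Nat) (cur : Int) (nr nc : Nat)
    (d : List (List Int)) (q : List (Nat × Nat)) (hsh : Shape hh ww d) :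
    Shape hh ww (rStep g hh ww r c cur nr nc (d, q)).1 ∧
    (∀ x y, pvGet2 (rStep g hh ww r c cur nr nc (d, q)).1 x y ≤ pvGet2 d x y) ∧
    (∀ x y, (x ≠ nr ∨ y ≠ nc) →
      pvGet2 (rStep g hh ww r c cur nr nc (d, q)).1 x y = pvGet2 d x y) ∧
    (nr < hh → nc < ww →
      pvGet2 (rStep g hh ww r c cur nr nc (d, q)).1 nr nc ≤ cur + pvCost g r c nr nc) ∧
    ((∀ x y, x < hh → y < ww → dpF g x y ≤ pvGet2 d x y) →
      dpF g nr nc ≤ cur + pvCost g r c nr nc →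
      ∀ x y, x < hh → y < ww → dpF g x y ≤ pvGet2 (rStep g hh ww r c cur nr nc (d, q)).1 x y) ∧
    (((rStep g hh ww r c cur nr nc (d, q)).2 = q ∧ (rStep g hh ww r c cur nr nc (d, q)).1 = d) ∨
     ((rStep g hh ww r c cur nr nc (d, q)).2 = q ++ [(nr, nc)] ∧ nr < hh ∧ nc < ww ∧
      sumD (rStep g hh ww r c cur nr nc (d, q)).1 + 1 ≤ sumD d)) := by
  unfold rStep
  split_ifs with hg hu
  · -- in range, updated
    obtain ⟨hnr, hnc⟩ := hg
    obtain ⟨hlen, hrows⟩ := hsh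
    have hrd : nr < d.length := by omega
    have hcd : nc < (d.getD nr []).length := by rw [hrows nr hnr]; exact hnc
    simp only at hu ⊢
    have hself : pvGet2 (pvSet2 d nr nc (cur + pvCost g r c nr nc)) nr nc =
        cur + pvCost g r c nr nc := get2_set2_self d nr nc _ hrd hcd
    have hne : ∀ x y, (x ≠ nr ∨ y ≠ nc) →
        pvGet2 (pvSet2 d nr nc (cur + pvCost g r c nr nc)) x y = pvGet2 d x y :=
      fun x y h => get2_set2_ne d nr nc x y _ h
    refine ⟨shape_set2 hh ww d nr nc _ ⟨hlen, hrows⟩, ?_, hne, ?_, ?_, ?_⟩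
    · intro x y
      by_cases hxy : x = nr ∧ y = nc
      · obtain ⟨rfl, rfl⟩ := hxy; rw [hself]; omega
      · rw [hne x y (by tauto)]
    · intro _ _; rw [hself]
    · intro hl hdp x y hx hy
      by_cases hxy : x = nr ∧ y = nc
      · obtain ⟨rfl, rfl⟩ := hxy; rw [hself]; exact hdp
      · rw [hne x y (by tauto)]; exact hl x y hx hy
    · refine Or.inr ⟨by trivial, hnr, hnc, ?_⟩
      rw [sumD_set2 d nr nc _ hrd hcd]
      omega
  · -- in range, not updated
    refine ⟨hsh, fun x y => le_refl _, fun x y _ => rfl, ?_, fun hl _ => hl, Or.inl ⟨rfl, rfl⟩⟩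
    intro _ _; simpa using not_lt.mp hu
  · -- out of range
    refine ⟨hsh, fun x y => le_refl _, fun x y _ => rfl, ?_, fun hl _ => hl, Or.inl ⟨rfl, rfl⟩⟩
    intro h1 h2; exact absurd ⟨h1, h2⟩ hg

-- one pop of the queue preserves the invariant and strictly decreases the measure
set_option maxHeartbeats 2000000 in
lemma step_inv (g : List (List Char)) (hh ww r c : Nat) (rest : List (Nat × Nat))
    (d : List (List Int)) (hinv : InvA g hh ww d ((r, c) :: rest)) :
    InvA g hh ww
      (pvRelax g hh ww r c (pvGet2 d r c) 0 1 (pvRelax g hh ww r c (pvGet2 d r c) 1 0 (d, rest))).1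
      (pvRelax g hh ww r c (pvGet2 d r c) 0 1 (pvRelax g hh ww r c (pvGet2 d r c) 1 0 (d, rest))).2 ∧
    muM (pvRelax g hh ww r c (pvGet2 d r c) 0 1 (pvRelax g hh ww r c (pvGet2 d r c) 1 0 (d, rest))).1
        (pvRelax g hh ww r c (pvGet2 d r c) 0 1 (pvRelax g hh ww r c (pvGet2 d r c) 1 0 (d, rest))).2
      < muM d ((r, c) :: rest) := by
  obtain ⟨hsh, hstart, hlow, hedge, hq⟩ := hinv
  have hrc := hq (r, c) List.mem_cons_self
  obtain ⟨hr, hc⟩ : r < hh ∧ c < ww := by simpa using hrc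
  simp only [relax_eq, Nat.add_zero]
  obtain ⟨sh1, mono1, ne1, rel1, low1, q1⟩ :=
    rStep_spec g hh ww r c (pvGet2 d r c) (r + 1) c d rest hsh
  set st1 := rStep g hh ww r c (pvGet2 d r c) (r + 1) c (d, rest) with hst1def
  obtain ⟨sh2, mono2, ne2, rel2, low2, q2⟩ :=
    rStep_spec g hh ww r c (pvGet2 d r c) r (c + 1) st1.1 st1.2 sh1
  simp only [Prod.mk.eta] at sh2 mono2 ne2 rel2 low2 q2
  set st2 := rStep g hh ww r c (pvGet2 d r c) r (c + 1) st1 with hst2def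
  -- basic facts
  have hcur_low : dpF g r c ≤ pvGet2 d r c := hlow r c hr hc
  have hdp1 : dpF g (r + 1) c ≤ pvGet2 d r c + pvCost g r c (r + 1) c :=
    le_trans (dp_pred_down g r c) (by omega)
  have hdp2 : dpF g r (c + 1) ≤ pvGet2 d r c + pvCost g r c r (c + 1) :=
    le_trans (dp_pred_right g r c) (by omega)
  have low1' := low1 hlow hdp1
  have low2' := low2 low1' hdp2
  have hrcne1 : pvGet2 st1.1 r c = pvGet2 d r c := ne1 r c (Or.inl (by omega))
  have hrc2 : pvGet2 st2.1 r c = pvGet2 d r c := by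
    rw [ne2 r c (Or.inr (by omega))]; exact hrcne1
  have hmono : ∀ x y, pvGet2 st2.1 x y ≤ pvGet2 d x y :=
    fun x y => le_trans (mono2 x y) (mono1 x y)
  have hsub1 : ∀ p ∈ rest, p ∈ st1.2 := by
    rcases q1 with ⟨hq1, _⟩ | ⟨hq1, _, _, _⟩ <;> rw [hq1] <;> intro p hp
    · exact hp
    · exact List.mem_append_left _ hp
  have hsub2 : ∀ p ∈ st1.2, p ∈ st2.2 := by
    rcases q2 with ⟨hq2, _⟩ | ⟨hq2, _, _, _⟩ <;> rw [hq2] <;> intro p hp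
    · exact hp
    · exact List.mem_append_left _ hp
  have hch : ∀ x y, pvGet2 st2.1 x y = pvGet2 d x y ∨ (x, y) ∈ st2.2 := by
    intro x y
    by_cases h1 : x = r + 1 ∧ y = c
    · obtain ⟨rfl, rfl⟩ := h1
      rcases q1 with ⟨hq1, hd1⟩ | ⟨hq1, _, _, _⟩
      · left; rw [ne2 _ _ (Or.inl (by omega)), hd1]
      · right
        exact hsub2 _ (by rw [hq1]; exact List.mem_append_right _ (by simp))
    · by_cases h2 : x = r ∧ y = c + 1
      · obtain ⟨rfl, rfl⟩ := h2
        rcases q2 with ⟨hq2, hd2⟩ | ⟨hq2, _, _, _⟩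
        · left; rw [hd2]; exact ne1 _ _ (Or.inl (by omega))
        · right; rw [hq2]; exact List.mem_append_right _ (by simp)
      · left
        rw [ne2 x y (by tauto), ne1 x y (by tauto)]
  have hdown : r + 1 < hh → pvGet2 st2.1 (r + 1) c ≤ pvGet2 st2.1 r c + pvCost g r c (r + 1) c := by
    intro h
    rw [hrc2, ne2 _ _ (Or.inl (by omega))]
    exact rel1 h hc
  have hright : c + 1 < ww → pvGet2 st2.1 r (c + 1) ≤ pvGet2 st2.1 r c + pvCost g r c r (c + 1) := by
    intro h
    rw [hrc2]
    exact rel2 hr h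
  refine ⟨⟨sh2, ?_, low2', ?_, ?_⟩, ?_⟩
  · -- start cell untouched
    rw [ne2 0 0 (Or.inr (by omega)), ne1 0 0 (Or.inl (by omega))]
    exact hstart
  · -- edge invariant
    intro x y hx hy
    rcases hedge x y hx hy with hmem | ⟨hod, hor⟩
    · rcases List.mem_cons.mp hmem with heq | hmem'
      · obtain ⟨rfl, rfl⟩ : x = r ∧ y = c := by
          constructor <;> [exact congrArg Prod.fst heq; exact congrArg Prod.snd heq]
        exact Or.inr ⟨hdown, hright⟩
      · exact Or.inl (hsub2 _ (hsub1 _ hmem'))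
    · rcases hch x y with heq | hmem
      · refine Or.inr ⟨?_, ?_⟩
        · intro h
          calc pvGet2 st2.1 (x + 1) y ≤ pvGet2 d (x + 1) y := hmono _ _
            _ ≤ pvGet2 d x y + pvCost g x y (x + 1) y := hod h
            _ = pvGet2 st2.1 x y + pvCost g x y (x + 1) y := by rw [heq]
        · intro h
          calc pvGet2 st2.1 x (y + 1) ≤ pvGet2 d x (y + 1) := hmono _ _
            _ ≤ pvGet2 d x y + pvCost g x y x (y + 1) := hor h
            _ = pvGet2 st2.1 x y + pvCost g x y x (y + 1) := by rw [heq]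
      · exact Or.inl hmem
  · -- queue validity
    intro p hp
    have hrest : ∀ p ∈ rest, p.1 < hh ∧ p.2 < ww := fun p hp => hq p (List.mem_cons_of_mem _ hp)
    rcases q2 with ⟨hq2, _⟩ | ⟨hq2, hnr2, hnc2, _⟩ <;>
      rcases q1 with ⟨hq1, _⟩ | ⟨hq1, hnr1, hnc1, _⟩ <;>
      rw [hq2, hq1] at hp
    · exact hrest _ hp
    · rcases List.mem_append.mp hp with hp' | hp'
      · exact hrest _ hp'
      · simp only [List.mem_singleton] at hp'; subst hp'; exact ⟨hnr1, hnc1⟩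
    · rcases List.mem_append.mp hp with hp' | hp'
      · exact hrest _ hp'
      · simp only [List.mem_singleton] at hp'; subst hp'; exact ⟨hnr2, hnc2⟩
    · rcases List.mem_append.mp hp with hp' | hp'
      · rcases List.mem_append.mp hp' with hp'' | hp''
        · exact hrest _ hp''
        · simp only [List.mem_singleton] at hp''; subst hp''; exact ⟨hnr1, hnc1⟩
      · simp only [List.mem_singleton] at hp'; subst hp'; exact ⟨hnr2, hnc2⟩
  · -- measure decreases
    have hn2 : 0 ≤ sumD st2.1 := sumD_nonneg g hh ww st2.1 sh2 low2'
    rcases q2 with ⟨hq2, hd2⟩ | ⟨hq2, _, _, hs2⟩ <;>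
      rcases q1 with ⟨hq1, hd1⟩ | ⟨hq1, _, _, hs1⟩
    · have e : sumD st2.1 = sumD d := by rw [hd2, hd1]
      simp only [muM, hq2, hq1, List.length_cons]
      omega
    · have e : sumD st2.1 = sumD st1.1 := by rw [hd2]
      simp only [muM, hq2, hq1, List.length_append, List.length_cons, List.length_nil]
      omega
    · have e : sumD st1.1 = sumD d := by rw [hd1]
      simp only [muM, hq2, hq1, List.length_append, List.length_cons, List.length_nil]
      omega
    · simp only [muM, hq2, hq1, List.length_append, List.length_cons, List.length_nil]
      omega

-- when the queue is empty every edge is relaxed, so dist is exactly the DP table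
lemma final_eq (g : List (List Char)) (hh ww : Nat)
    (d : List (List Int)) (hinv : InvA g hh ww d []) : d = dpMat g hh ww := by
  obtain ⟨⟨hlen, hrows⟩, hstart, hlow, hedge, _⟩ := hinv
  have hrel : ∀ x y, x < hh → y < ww →
      (x + 1 < hh → pvGet2 d (x + 1) y ≤ pvGet2 d x y + pvCost g x y (x + 1) y) ∧
      (y + 1 < ww → pvGet2 d x (y + 1) ≤ pvGet2 d x y + pvCost g x y x (y + 1)) := by
    intro x y hx hy
    rcases hedge x y hx hy with h | h
    · simp at h
    · exact h
  have hup : ∀ n x y, x + y ≤ n → x < hh → y < ww → pvGet2 d x y ≤ dpF g x y := by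
    intro n
    induction n with
    | zero =>
      intro x y h hx hy
      obtain ⟨rfl, rfl⟩ : x = 0 ∧ y = 0 := by omega
      rw [hstart]
    | succ n ih =>
      intro x y h hx hy
      match x, y with
      | 0, 0 => rw [hstart]
      | 0, y + 1 =>
        have h1 := (hrel 0 y (by omega) (by omega)).2 hy
        have h2 := ih 0 y (by omega) hx (by omega)
        simp only [dpF]
        linarith
      | x + 1, 0 =>
        have h1 := (hrel x 0 (by omega) (by omega)).1 hx
        have h2 := ih x 0 (by omega) (by omega) hy
        simp only [dpF]
        linarith
      | x + 1, y + 1 =>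
        have h1 := (hrel x (y + 1) (by omega) hy).1 hx
        have h2 := ih x (y + 1) (by omega) (by omega) hy
        have h3 := (hrel (x + 1) y hx (by omega)).2 hy
        have h4 := ih (x + 1) y (by omega) hx (by omega)
        simp only [dpF, le_min_iff]
        constructor <;> linarith
  have heq : ∀ x y, x < hh → y < ww → pvGet2 d x y = dpF g x y := fun x y hx hy =>
    le_antisymm (hup (x + y) x y le_rfl hx hy) (hlow x y hx hy)
  have hdlen : (dpMat g hh ww).length = hh := by simp [dpMat]
  apply List.ext_getElem (by omega)
  intro i h1 h2
  have hi : i < hh := by omega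
  have hrowi : d.getD i [] = d[i] := List.getD_eq_getElem d [] h1
  have hleni : d[i].length = ww := by rw [← hrowi]; exact hrows i hi
  have hdpi : (dpMat g hh ww)[i] = (List.range ww).map (fun c => dpF g i c) := by
    simp [dpMat]
  apply List.ext_getElem (by rw [hleni, hdpi]; simp)
  intro j hj1 hj2
  have hj : j < ww := by omega
  have := heq i j hi hj
  unfold pvGet2 at this
  rw [hrowi, List.getD_eq_getElem _ _ hj1] at this
  rw [this]
  simp [dpMat]

lemma loop_dp (g : List (List Char)) (hh ww : Nat) :
    ∀ fuel d q, InvA g hh ww d q → muM d q ≤ fuel →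
      pvLoop g hh ww fuel d q = dpMat g hh ww := by
  intro fuel
  induction fuel with
  | zero =>
    intro d q hinv hmu
    cases q with
    | nil => simpa [pvLoop] using final_eq g hh ww d hinv
    | cons p rest => simp [muM] at hmu
  | succ f ih =>
    intro d q hinv hmu
    cases q with
    | nil => simpa [pvLoop] using final_eq g hh ww d hinv
    | cons p rest =>
      obtain ⟨r, c⟩ := p
      obtain ⟨hinv2, hmu2⟩ := step_inv g hh ww r c rest d hinv
      simp only [pvLoop]
      exact ih _ _ hinv2 (by omega)

-- initial state satisfies the invariant
lemma getD_replicate' {α : Type} (n i : Nat) (a dflt : α) (h : i < n) :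
    (List.replicate n a).getD i dflt = a := by
  rw [List.getD_eq_getElem _ _ (by simpa using h)]
  simp

lemma inv_init (g : List (List Char)) (hh ww : Nat) (h0 : 0 < hh) (w0 : 0 < ww)
    (hb : hh + ww ≤ 2 ^ 60) :
    InvA g hh ww
      (pvSet2 (List.replicate hh (List.replicate ww ((2 : Int) ^ 60))) 0 0
        (if pvCh g 0 0 = '#' then 1 else 0)) [(0, 0)] := by
  have hget0 : ∀ x y, x < hh → y < ww →
      pvGet2 (List.replicate hh (List.replicate ww ((2 : Int) ^ 60))) x y = (2 : Int) ^ 60 := by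
    intro x y hx hy
    unfold pvGet2
    rw [getD_replicate' _ _ _ _ hx]
    exact getD_replicate' _ _ _ _ hy
  have hsh0 : Shape hh ww (List.replicate hh (List.replicate ww ((2 : Int) ^ 60))) := by
    refine ⟨by simp, ?_⟩
    intro i hi
    rw [List.getD_eq_getElem _ _ (by simpa using hi)]
    simp
  have hr0 : 0 < (List.replicate hh (List.replicate ww ((2 : Int) ^ 60))).length := by simpa using h0
  have hc0 : 0 < ((List.replicate hh (List.replicate ww ((2 : Int) ^ 60))).getD 0 []).length := by
    rw [List.getD_eq_getElem _ _ hr0]; simpa using w0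
  have hself : pvGet2 (pvSet2 (List.replicate hh (List.replicate ww ((2 : Int) ^ 60))) 0 0
      (if pvCh g 0 0 = '#' then 1 else 0)) 0 0 = (if pvCh g 0 0 = '#' then 1 else 0) :=
    get2_set2_self _ _ _ _ hr0 hc0
  have hne : ∀ x y, (x ≠ 0 ∨ y ≠ 0) →
      pvGet2 (pvSet2 (List.replicate hh (List.replicate ww ((2 : Int) ^ 60))) 0 0
        (if pvCh g 0 0 = '#' then 1 else 0)) x y =
      pvGet2 (List.replicate hh (List.replicate ww ((2 : Int) ^ 60))) x y :=
    fun x y h => get2_set2_ne _ _ _ _ _ _ h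
  refine ⟨shape_set2 _ _ _ _ _ _ hsh0, by rw [hself]; simp [dpF], ?_, ?_, ?_⟩
  · -- lower bound
    intro x y hx hy
    by_cases hxy : x = 0 ∧ y = 0
    · obtain ⟨rfl, rfl⟩ := hxy
      rw [hself]
      simp [dpF]
    · rw [hne x y (by tauto), hget0 x y hx hy]
      have hdb := dp_bound g x y
      have h260 : ((2 : Int) ^ 60) = ((2 ^ 60 : Nat) : Int) := by norm_num
      rw [h260]
      omega
  · -- edges
    intro x y hx hy
    by_cases hxy : x = 0 ∧ y = 0
    · obtain ⟨rfl, rfl⟩ := hxy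
      exact Or.inl (by simp)
    · refine Or.inr ⟨?_, ?_⟩
      · intro h
        rw [hne x y (by tauto), hne (x + 1) y (Or.inl (by omega)),
          hget0 x y hx hy, hget0 (x + 1) y h hy]
        have := cost_nonneg g x y (x + 1) y
        omega
      · intro h
        rw [hne x y (by tauto), hne x (y + 1) (Or.inr (by omega)),
          hget0 x y hx hy, hget0 x (y + 1) hx h]
        have := cost_nonneg g x y x (y + 1)
        omega
  · intro p hp
    simp only [List.mem_singleton] at hp
    subst hp
    exact ⟨h0, w0⟩

lemma mu_init (g : List (List Char)) (hh ww : Nat) (h0 : 0 < hh) (w0 : 0 < ww) :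
    muM (pvSet2 (List.replicate hh (List.replicate ww ((2 : Int) ^ 60))) 0 0
        (if pvCh g 0 0 = '#' then 1 else 0)) [(0, 0)] ≤ pvFuel hh ww := by
  have hr0 : 0 < (List.replicate hh (List.replicate ww ((2 : Int) ^ 60))).length := by simpa using h0
  have hc0 : 0 < ((List.replicate hh (List.replicate ww ((2 : Int) ^ 60))).getD 0 []).length := by
    rw [List.getD_eq_getElem _ _ hr0]; simpa using w0
  have hs0 : sumD (List.replicate hh (List.replicate ww ((2 : Int) ^ 60))) =
      (hh : Int) * ((ww : Int) * 2 ^ 60) := by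
    unfold sumD
    rw [List.map_replicate, List.sum_replicate, List.sum_replicate]
    push_cast
    ring
  rw [muM, sumD_set2 _ _ _ _ hr0 hc0, hs0]
  have hv : (if pvCh g 0 0 = '#' then (1 : Int) else 0) ≤ 1 := by split <;> norm_num
  have hv0 : (0 : Int) ≤ (if pvCh g 0 0 = '#' then (1 : Int) else 0) := by split <;> norm_num
  have hg00 : pvGet2 (List.replicate hh (List.replicate ww ((2 : Int) ^ 60))) 0 0 = 2 ^ 60 := by
    unfold pvGet2
    rw [getD_replicate' _ _ _ _ h0]
    exact getD_replicate' _ _ _ _ w0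
  rw [hg00]
  have hcast : (hh : Int) * ((ww : Int) * 2 ^ 60) = ((hh * ww * 2 ^ 60 : Nat) : Int) := by
    push_cast; ring
  unfold pvFuel
  rw [hcast]
  simp only [List.length_cons, List.length_nil]
  omega

-- ===== B equals the DP table =====
lemma rowB_eq (g : List (List Char)) (ww r : Nat) (prev : List Int)
    (hprev : ∀ c, c < ww → 0 < r → prev.getD c 0 = dpF g (r - 1) c) :
    ∀ n, n ≤ ww →
      (List.range n).foldl (fun row c => row ++ [pvCellB g prev row r c]) [] =
        (List.range n).map (dpF g r) := by
  intro n
  induction n with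
  | zero => intro _; simp
  | succ n ih =>
    intro hn
    rw [List.range_succ, List.foldl_append, List.map_append, ih (by omega)]
    simp only [List.foldl_cons, List.foldl_nil, List.map_cons, List.map_nil]
    have hrowget : ∀ m, m < n → ((List.range n).map (dpF g r)).getD m 0 = dpF g r m := by
      intro m hm
      rw [List.getD_eq_getElem _ _ (by simpa using hm)]
      simp
    have hcell : pvCellB g prev ((List.range n).map (dpF g r)) r n = dpF g r n := by
      cases r with
      | zero =>
        cases n with
        | zero => simp [pvCellB, dpF]
        | succ m => simp [pvCellB, dpF]
      | succ k =>
        cases n with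
        | zero =>
          have hp := hprev 0 (by omega) (by omega)
          simp only [Nat.add_sub_cancel, List.getD] at hp
          simp [pvCellB, hp, dpF]
        | succ m =>
          have hp := hprev (m + 1) (by omega) (by omega)
          simp only [Nat.add_sub_cancel, List.getD] at hp
          simp [pvCellB, hp, dpF]
    rw [hcell]

lemma outerB_eq (g : List (List Char)) (ww : Nat) :
    ∀ n,
      (List.range n).foldl
        (fun (acc : List (List Int) × List Int) r =>
          (acc.1 ++ [(List.range ww).foldl (fun row c => row ++ [pvCellB g acc.2 row r c]) []],
           (List.range ww).foldl (fun row c => row ++ [pvCellB g acc.2 row r c]) []))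
        ([], []) =
      ((List.range n).map (fun r => (List.range ww).map (dpF g r)),
       if n = 0 then [] else (List.range ww).map (dpF g (n - 1))) := by
  intro n
  induction n with
  | zero => simp
  | succ n ih =>
    rw [List.range_succ, List.foldl_append, ih]
    simp only [List.foldl_cons, List.foldl_nil]
    have hprev : ∀ c, c < ww → 0 < n →
        (if n = 0 then ([] : List Int) else (List.range ww).map (dpF g (n - 1))).getD c 0 =
          dpF g (n - 1) c := by
      intro c hc hn
      rw [if_neg (by omega)]
      rw [List.getD_eq_getElem _ _ (by simpa using hc)]
      simp
    rw [rowB_eq g ww n _ hprev ww le_rfl]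
    simp

lemma alt_eq_dp (grid : List String) :
    bfs_alt grid =
      dpMat (grid.map String.toList) grid.length
        (((grid.map String.toList).headD []).length) := by
  simp only [bfs_alt]
  rw [outerB_eq]
  simp [dpMat]

lemma headD_map_toList (grid : List String) :
    (grid.map String.toList).headD [] = (grid.headD "").toList := by
  cases grid <;> simp

-- ===== VERDICT (by name: the statement is the Claim_ definition above) =====
theorem bfs_spec : Claim_equal_bfs := by
  intro grid _ hpre
  obtain ⟨hne, hw0, _hrows, hb⟩ := hpre
  unfold Spec_bfs bfs
  have h0 : 0 < grid.length := List.length_pos_iff.mpr hne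
  have hwlen : ((grid.map String.toList).headD []).length = (grid.headD "").length := by
    rw [headD_map_toList]; simp
  rw [alt_eq_dp]
  simp only []
  rw [loop_dp _ _ _ _ _ _
    (inv_init _ _ _ h0 (by omega) (by omega))
    (mu_init _ _ _ h0 (by omega))]
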